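-- pv_equiv track=rewrite | github.com/j3nn1s2u/Presentation_Discourse_Analyzer | V2/src/segmenter.py | segment_paragraphs
-- ===== SOURCE A (Python) =====
-- def segment_paragraphs(text: str, min_length: int = 10) -> list:
--     """
--     將清理後的文本分割成段落
--
--     Args:
--         text (str): 清理後的文本
--         min_length (int): 段落最小長度，過短的段落會被過濾
--
--     Returns:
--         list: 段落列表
--     """
--     if not text:
--         return []
--
--     # 以雙換行分割段落，然後清理空段落
--     raw_paragraphs = text.split('\n\n')
--
--     # 進一步處理：以單換行分割，但保留有意義的段落
--     all_lines = []
--     for para in raw_paragraphs: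
--         lines = [line.strip() for line in para.split('\n') if line.strip()]
--         all_lines.extend(lines)
--
--     # 過濾掉過短的段落
--     paragraphs = [p for p in all_lines if len(p.strip()) >= min_length]
--
--     return paragraphs
-- ===== SOURCE B (Python) =====
-- def segment_paragraphs(text: str, min_length: int = 10) -> list:
--     """Single flat pass: split on '\n', strip each line, keep non-empty ones of sufficient length."""
--     return [s for line in text.split('\n') if (s := line.strip()) and len(s) >= min_length]
-- ===== Notes on version B (the rewrite author's own statement) =====
-- stated objective: simpler
-- what changed: Replaces A's two-level split (blank-line paragraph split, then a per-chunk line split flattened with nested loops, plus a separate length-filter pass) by a single flat comprehension over one newline split, using that the nested double split followed by empty-line filtering equals a single newline split.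
import Mathlib
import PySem

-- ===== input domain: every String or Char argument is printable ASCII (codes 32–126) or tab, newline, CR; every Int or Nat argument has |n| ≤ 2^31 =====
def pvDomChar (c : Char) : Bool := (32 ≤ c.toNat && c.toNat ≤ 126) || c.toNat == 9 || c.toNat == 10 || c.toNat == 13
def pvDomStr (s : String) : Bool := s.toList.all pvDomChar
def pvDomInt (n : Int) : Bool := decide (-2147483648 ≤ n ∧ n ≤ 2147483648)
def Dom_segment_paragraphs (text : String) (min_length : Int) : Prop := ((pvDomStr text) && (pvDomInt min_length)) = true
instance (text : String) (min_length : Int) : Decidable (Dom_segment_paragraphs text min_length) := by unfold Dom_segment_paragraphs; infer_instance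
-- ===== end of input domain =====

-- B replaces A's two-level split (paragraphs on "\n\n", then lines on "\n", nested loops plus a
-- separate length-filter pass) by one flat pass over a single split on "\n"; objective: simpler.

-- ===== PORT A =====
def segment_paragraphs (text : String) (min_length : Int) : List String :=
  if text = "" then []
  else
    let raw_paragraphs := PySem.Chars.splitOn text.toList ['\n', '\n']
    let all_lines := raw_paragraphs.foldl (fun acc para =>
      acc ++ (((PySem.Chars.splitOn para ['\n']).filter
        (fun line => decide (PySem.Chars.strip line ≠ []))).map PySem.Chars.strip)) []
    (all_lines.filter
      (fun p => decide (min_length ≤ PySem.Chars.len (PySem.Chars.strip p)))).map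
      (fun p => String.ofList p)

-- ===== PORT B =====
def segment_paragraphs_alt (text : String) (min_length : Int) : List String :=
  (PySem.Chars.splitOn text.toList ['\n']).filterMap (fun line =>
    let s := PySem.Chars.strip line
    if s ≠ [] ∧ min_length ≤ PySem.Chars.len s then some (String.ofList s) else none)

-- ===== PRECONDITION & SPEC =====
def Spec_segment_paragraphs (text : String) (min_length : Int) (out : List String) : Prop := out = segment_paragraphs_alt text min_length
instance (text : String) (min_length : Int) (out : List String) : Decidable (Spec_segment_paragraphs text min_length out) := by unfold Spec_segment_paragraphs; infer_instance

-- ===== CLAIM (what is proved, stated in full; the proofs are below) =====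
def Claim_equal_segment_paragraphs : Prop := ∀ (text : String) (min_length : Int), Dom_segment_paragraphs text min_length → Spec_segment_paragraphs text min_length (segment_paragraphs text min_length)

-- ===== LEMMAS AND PROOFS =====
def split1 : List Char → List (List Char)
  | [] => [[]]
  | c :: rest => if c = '\n' then [] :: split1 rest else (split1 rest).modifyHead (c :: ·)

def split2 : List Char → List (List Char)
  | [] => [[]]
  | [c] => (split2 []).modifyHead (c :: ·)
  | c :: d :: rest => if c = '\n' ∧ d = '\n' then [] :: split2 rest
                      else (split2 (d :: rest)).modifyHead (c :: ·)

theorem modifyHead_id_eq {α : Type} (l : List α) : l.modifyHead (fun x => x) = l := by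
  cases l <;> rfl

theorem go_one (fuel : Nat) (l cur : List Char) (acc : List (List Char)) (h : l.length < fuel) :
    PySem.Chars.splitOn.go ['\n'] fuel l cur acc
      = acc.reverse ++ (split1 l).modifyHead (cur.reverse ++ ·) := by
  induction fuel generalizing l cur acc with
  | zero => omega
  | succ fuel ih =>
    cases l with
    | nil => simp [PySem.Chars.splitOn.go, split1]
    | cons c rest =>
      simp only [PySem.Chars.splitOn.go, List.isPrefixOf, List.isPrefixOf_nil_left,
        Bool.and_true, beq_iff_eq, List.length_cons, List.length_nil, List.drop_succ_cons,
        List.drop_zero, decide_eq_true_eq]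
      by_cases hc : '\n' = c
      · subst hc
        rw [if_pos rfl, ih rest [] (cur.reverse :: acc) (by simp at h; omega)]
        simp [split1, modifyHead_id_eq]
      · rw [if_neg hc, ih rest (c :: cur) acc (by simp at h; omega)]
        have hc' : ¬ c = '\n' := fun h' => hc h'.symm
        simp [split1, hc', List.modifyHead_modifyHead, Function.comp_def]

theorem go_two (fuel : Nat) (l cur : List Char) (acc : List (List Char)) (h : l.length < fuel) :
    PySem.Chars.splitOn.go ['\n', '\n'] fuel l cur acc
      = acc.reverse ++ (split2 l).modifyHead (cur.reverse ++ ·) := by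
  induction fuel generalizing l cur acc with
  | zero => omega
  | succ fuel ih =>
    match l with
    | [] => simp [PySem.Chars.splitOn.go, split2]
    | [c] =>
      simp only [PySem.Chars.splitOn.go, List.isPrefixOf, List.isPrefixOf_nil_left,
        Bool.and_true, Bool.and_false, beq_iff_eq]
      rw [if_neg (by simp), ih [] (c :: cur) acc (by simp at h ⊢; omega)]
      simp [split2, List.modifyHead_modifyHead, Function.comp_def]
    | c :: d :: rest =>
      simp only [PySem.Chars.splitOn.go, List.isPrefixOf, List.isPrefixOf_nil_left,
        Bool.and_true, beq_iff_eq, List.length_cons, List.drop_succ_cons, List.drop_zero,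
        List.length_nil]
      by_cases hcd : '\n' = c ∧ '\n' = d
      · obtain ⟨h1, h2⟩ := hcd; subst h1; subst h2
        rw [if_pos (by simp), ih rest [] (cur.reverse :: acc) (by simp at h; omega)]
        simp [split2, modifyHead_id_eq]
      · rw [if_neg (by simpa using fun a b => hcd ⟨a, b⟩),
            ih (d :: rest) (c :: cur) acc (by simp at h ⊢; omega)]
        have hcd' : ¬ (c = '\n' ∧ d = '\n') := fun ⟨a, b⟩ => hcd ⟨a.symm, b.symm⟩
        simp [split2, hcd', List.modifyHead_modifyHead, Function.comp_def]

theorem splitOn_one (cs : List Char) : PySem.Chars.splitOn cs ['\n'] = split1 cs := by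
  rw [PySem.Chars.splitOn, go_one cs.length.succ cs [] [] (by omega)]
  simp [modifyHead_id_eq]

theorem splitOn_two (cs : List Char) : PySem.Chars.splitOn cs ['\n', '\n'] = split2 cs := by
  rw [PySem.Chars.splitOn, go_two cs.length.succ cs [] [] (by omega)]
  simp [modifyHead_id_eq]

theorem split1_ne_nil (cs : List Char) : split1 cs ≠ [] := by
  induction cs with
  | nil => simp [split1]
  | cons c rest ih =>
    simp only [split1]
    split_ifs
    · simp
    · cases h : split1 rest with
      | nil => exact absurd h ih
      | cons a t => simp

theorem split2_ne_nil (cs : List Char) : split2 cs ≠ [] := by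
  induction cs using split2.induct with
  | case1 => simp [split2]
  | case2 c => simp [split2]
  | case3 c d rest h ih => simp [split2, h]
  | case4 c d rest h ih =>
    simp only [split2, if_neg h]
    cases h2 : split2 (d :: rest) with
    | nil => exact absurd h2 ih
    | cons a t => simp

/-- glue: concatenate piece-lists inserting an empty piece between groups. -/
def glue : List (List (List Char)) → List (List Char)
  | [] => []
  | [x] => x
  | x :: y :: t => x ++ [] :: glue (y :: t)

theorem glue_cons_cons {a : List Char} {A : List (List Char)} (M : List (List (List Char))) :
    glue ((a :: A) :: M) = a :: glue (A :: M) := by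
  cases M <;> simp [glue]

theorem split1_glue (cs : List Char) :
    split1 cs = glue ((split2 cs).map split1) := by
  induction cs using split2.induct with
  | case1 => simp [split1, split2, glue]
  | case2 c => simp [split2, glue, modifyHead_id_eq]
  | case3 c d rest h ih =>
    obtain ⟨h1, h2⟩ := h; subst h1; subst h2
    rw [show split2 ('\n' :: '\n' :: rest) = [] :: split2 rest by simp [split2]]
    rw [show split1 ('\n' :: '\n' :: rest) = [] :: [] :: split1 rest by simp [split1]]
    rw [List.map_cons]
    have hne : (split2 rest).map split1 ≠ [] := by
      simpa using split2_ne_nil rest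
    cases hM : (split2 rest).map split1 with
    | nil => exact absurd hM hne
    | cons m t =>
      rw [show split1 ([] : List Char) = [[]] from rfl]
      rw [show glue ([[]] :: m :: t) = [] :: [] :: glue (m :: t) by simp [glue]]
      rw [ih, hM]
  | case4 c d rest h ih =>
    simp only [split2, if_neg h, List.map_cons]
    obtain ⟨hh, ht, hsplit⟩ : ∃ hh ht, split2 (d :: rest) = hh :: ht := by
      cases h2 : split2 (d :: rest) with
      | nil => exact absurd h2 (split2_ne_nil _)
      | cons a t => exact ⟨a, t, rfl⟩
    rw [hsplit]
    by_cases hc : c = '\n'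
    · subst hc
      have hd : ¬ d = '\n' := fun hd => h ⟨rfl, hd⟩
      rw [show List.modifyHead (fun x => '\n' :: x) (hh :: ht) = ('\n' :: hh) :: ht from rfl]
      simp only [List.map_cons]
      rw [show split1 ('\n' :: hh) = [] :: split1 hh by simp [split1]]
      rw [glue_cons_cons]
      rw [show split1 ('\n' :: d :: rest) = [] :: split1 (d :: rest) by simp [split1]]
      rw [ih, hsplit]
      simp
    · rw [show List.modifyHead (fun x => c :: x) (hh :: ht) = (c :: hh) :: ht from rfl]
      simp only [List.map_cons]
      obtain ⟨h1, t1, hs1⟩ : ∃ h1 t1, split1 hh = h1 :: t1 := by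
        cases h2 : split1 hh with
        | nil => exact absurd h2 (split1_ne_nil _)
        | cons a t => exact ⟨a, t, rfl⟩
      rw [show split1 (c :: hh) = (split1 hh).modifyHead (c :: ·) by simp [split1, hc], hs1]
      rw [show List.modifyHead (fun x => c :: x) (h1 :: t1) = (c :: h1) :: t1 from rfl]
      rw [glue_cons_cons]
      rw [show split1 (c :: d :: rest) = (split1 (d :: rest)).modifyHead (c :: ·) by
        simp [split1, hc]]
      rw [ih, hsplit, List.map_cons, hs1, glue_cons_cons]
      rfl

theorem rstrip_prefix (t : List Char) : PySem.Chars.rstrip t <+: t := by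
  rw [PySem.Chars.rstrip, ← List.reverse_reverse t, List.reverse_prefix, List.reverse_reverse]
  exact List.dropWhile_suffix _

theorem strip_idem (s : List Char) :
    PySem.Chars.strip (PySem.Chars.strip s) = PySem.Chars.strip s := by
  rw [PySem.Chars.strip, PySem.Chars.strip]
  have h1 : PySem.Chars.lstrip (PySem.Chars.rstrip (PySem.Chars.lstrip s))
      = PySem.Chars.rstrip (PySem.Chars.lstrip s) := by
    rw [PySem.Chars.lstrip]
    cases hu : PySem.Chars.rstrip (PySem.Chars.lstrip s) with
    | nil => rfl
    | cons a u' =>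
      have hpre : PySem.Chars.rstrip (PySem.Chars.lstrip s) <+: PySem.Chars.lstrip s :=
        rstrip_prefix _
      rw [hu] at hpre
      obtain ⟨w, hw⟩ := hpre
      have hdw : List.dropWhile PySem.Chars.isspace s = a :: (u' ++ w) := by
        rw [← PySem.Chars.lstrip, ← hw]; simp
      have hne : List.dropWhile PySem.Chars.isspace s ≠ [] := by rw [hdw]; simp
      have ha : PySem.Chars.isspace a = false := by
        simpa [hdw] using List.head_dropWhile_not PySem.Chars.isspace hne
      simp [List.dropWhile_cons, ha]
  rw [h1, PySem.Chars.rstrip, PySem.Chars.rstrip, List.reverse_reverse,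
    List.dropWhile_idempotent]

theorem filter_glue (P : List (List Char)) (hP : P ≠ []) :
    ((glue (P.map split1)).map PySem.Chars.strip).filter (fun x => decide (x ≠ []))
      = P.flatMap (fun p =>
          ((split1 p).map PySem.Chars.strip).filter (fun x => decide (x ≠ []))) := by
  induction P with
  | nil => exact absurd rfl hP
  | cons p P' ih =>
    cases P' with
    | nil => simp [glue]
    | cons q t =>
      rw [show (List.map split1 (p :: q :: t)) = split1 p :: List.map split1 (q :: t) from rfl]
      rw [show glue (split1 p :: List.map split1 (q :: t))
            = split1 p ++ [] :: glue (List.map split1 (q :: t)) by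
          rw [List.map_cons]; exact rfl]
      rw [List.map_append, List.filter_append, List.flatMap_cons]
      rw [show ([] : List Char) :: glue (List.map split1 (q :: t))
            = [([] : List Char)] ++ glue (List.map split1 (q :: t)) from rfl]
      rw [List.map_append, List.filter_append]
      rw [show (([([] : List Char)]).map PySem.Chars.strip).filter (fun x => decide (x ≠ []))
            = [] by rfl]
      rw [List.nil_append, ih (by simp)]

theorem filterMap_if {α β : Type} (p : α → Prop) [DecidablePred p] (f : α → β) (l : List α) :
    (l.filterMap (fun x => if p x then some (f x) else none))
      = (l.filter (fun x => decide (p x))).map f := by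
  induction l with
  | nil => rfl
  | cons a l ih =>
    by_cases h : p a
    · simp [List.filterMap_cons, List.filter_cons, h, ih]
    · simp [List.filterMap_cons, List.filter_cons, h, ih]

theorem filterMap_B (min_length : Int) (l : List (List Char)) :
    l.filterMap (fun line =>
        let s := PySem.Chars.strip line
        if s ≠ [] ∧ min_length ≤ PySem.Chars.len s then some (String.ofList s) else none)
      = (l.filter (fun line => decide (PySem.Chars.strip line ≠ [])
            && decide (min_length ≤ PySem.Chars.len (PySem.Chars.strip line)))).map
          (fun line => String.ofList (PySem.Chars.strip line)) := by
  have h := filterMap_if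
    (fun line => PySem.Chars.strip line ≠ [] ∧ min_length ≤ PySem.Chars.len (PySem.Chars.strip line))
    (fun line => String.ofList (PySem.Chars.strip line)) l
  rw [show (fun line => decide (PySem.Chars.strip line ≠ [])
        && decide (min_length ≤ PySem.Chars.len (PySem.Chars.strip line)))
      = (fun line => decide (PySem.Chars.strip line ≠ []
          ∧ min_length ≤ PySem.Chars.len (PySem.Chars.strip line))) by
    funext line; rw [Bool.decide_and]]
  exact h

theorem main_eq (text : String) (min_length : Int) :
    segment_paragraphs text min_length = segment_paragraphs_alt text min_length := by
  by_cases ht : text = ""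
  · subst ht
    simp [segment_paragraphs, segment_paragraphs_alt, splitOn_one, split1,
      PySem.Chars.strip, PySem.Chars.lstrip, PySem.Chars.rstrip]
  · rw [segment_paragraphs, if_neg ht, segment_paragraphs_alt]
    simp only [splitOn_one, splitOn_two]
    rw [PySem.List.foldl_append_eq_flatMap, List.nil_append]
    have hinner : ∀ para, ((split1 para).filter
          (fun line => decide (PySem.Chars.strip line ≠ []))).map PySem.Chars.strip
        = ((split1 para).map PySem.Chars.strip).filter (fun x => decide (x ≠ [])) := by
      intro para
      rw [List.filter_map]
      rfl
    rw [List.flatMap_congr (fun para _ => hinner para)]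
    rw [← filter_glue (split2 text.toList) (split2_ne_nil _), ← split1_glue]
    rw [List.filter_filter, List.filter_map, filterMap_B, List.map_map]
    apply congrArg
    apply List.filter_congr
    intro line _
    simp only [Function.comp_apply, strip_idem, Bool.and_comm]

-- ===== VERDICT (by name: the statement is the Claim_ definition above) =====
theorem segment_paragraphs_spec : Claim_equal_segment_paragraphs :=
  fun text min_length _ => main_eq text min_length
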